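-- pv_equiv track=rewrite | github.com/Aesir9/helpinghand | hh/utils.py | services_to_string
-- ===== SOURCE A (Python) =====
-- def services_to_string(services, truncate=False):
--     """
--     This adds a new line if more than 8 ports are on one line
--     """
--     if not truncate:
--         return ', '.join([str(x) for x in services])
--
--     out = ''
--     for i, port in enumerate(services):
--         append = ''
--         if i != 0:
--             append = ', '
--         if not i % 8:
--             append += '\n'
--         out += append + str(port)
--     return out.strip()
-- ===== SOURCE B (Python) =====
-- def services_to_string(services, truncate=False):
--     """
--     This adds a new line if more than 8 ports are on one line
--     """
--     if not truncate:
--         return ', '.join([str(x) for x in services])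
--
--     services = list(services)
--     chunks = []
--     i = 0
--     while i < len(services):
--         chunks.append(', '.join(str(x) for x in services[i:i+8]))
--         i += 8
--     return ', \n'.join(chunks).strip()
-- ===== Notes on version B (the rewrite author's own statement) =====
-- stated objective: simpler
-- what changed: B builds the 8-item chunks up front with an index loop over services[i:i+8] and joins them with ', ' inside and ', \n' between chunks, instead of A's per-element enumerate loop testing i % 8 and accumulating a string.
import Mathlib
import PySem

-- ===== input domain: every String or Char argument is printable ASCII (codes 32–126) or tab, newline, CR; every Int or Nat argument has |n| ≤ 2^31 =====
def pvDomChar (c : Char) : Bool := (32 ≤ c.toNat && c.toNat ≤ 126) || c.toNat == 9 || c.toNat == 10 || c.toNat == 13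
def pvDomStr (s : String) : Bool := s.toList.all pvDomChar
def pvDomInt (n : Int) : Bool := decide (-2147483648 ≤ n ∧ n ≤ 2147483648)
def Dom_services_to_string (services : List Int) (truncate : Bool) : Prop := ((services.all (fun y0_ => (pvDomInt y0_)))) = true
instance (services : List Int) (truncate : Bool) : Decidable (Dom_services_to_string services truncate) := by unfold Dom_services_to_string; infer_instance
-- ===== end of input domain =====

-- B groups the services into 8-item chunks up front and joins them with ', \n',
-- instead of A's per-index `i % 8` test and string accumulation (objective: simpler decomposition, same cost).

-- ===== PORT A =====
-- literal port of A's enumerate loop: out += append + str(port), then .strip()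
def services_to_string (services : List Int) (truncate : Bool) : String :=
  if !truncate then
    PySem.Str.join ", " (services.map PySem.Int.toStr)
  else
    PySem.Str.strip
      ((PySem.List.enumerate services).foldl
        (fun out p =>
          let append := if p.1 != 0 then ", " else ""
          let append := if PySem.Int.mod p.1 8 == 0 then append ++ "\n" else append
          out ++ append ++ PySem.Int.toStr p.2)
        "")

-- ===== PORT B =====
-- the while loop of Source B: index i advances by 8, each step slices services[i:i+8]
-- (i starts at 0 and only grows by 8, so a Nat counter is exact)
def chunksFrom (services : List Int) (i : Nat) : List String :=
  if i < services.length then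
    PySem.Str.join ", " ((PySem.List.slice services (some (i : Int)) (some ((i : Int) + 8))).map PySem.Int.toStr)
      :: chunksFrom services (i + 8)
  else []
termination_by services.length - i

def services_to_string_alt (services : List Int) (truncate : Bool) : String :=
  if !truncate then
    PySem.Str.join ", " (services.map PySem.Int.toStr)
  else
    PySem.Str.strip (PySem.Str.join ", \n" (chunksFrom services 0))

-- ===== PRECONDITION & SPEC =====
def Spec_services_to_string (services : List Int) (truncate : Bool) (out : String) : Prop := out = services_to_string_alt services truncate
instance (services : List Int) (truncate : Bool) (out : String) : Decidable (Spec_services_to_string services truncate out) := by unfold Spec_services_to_string; infer_instance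

-- ===== CLAIM (what is proved, stated in full; the proofs are below) =====
def Claim_equal_services_to_string : Prop := ∀ (services : List Int) (truncate : Bool), Dom_services_to_string services truncate → Spec_services_to_string services truncate (services_to_string services truncate)

-- ===== LEMMAS AND PROOFS =====

-- proof-side view of B's chunk loop: recursion peeling 8 elements at a time
def altChunks : List Int → List String
  | [] => []
  | x :: xs =>
      PySem.Str.join ", " (((x :: xs).take 8).map PySem.Int.toStr) :: altChunks (xs.drop 7)
termination_by l => l.length
decreasing_by simp [List.length_drop]

lemma chunksFrom_eq_fuel (services : List Int) (n : Nat) : ∀ (i : Nat), services.length - i ≤ n →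
    chunksFrom services i = altChunks (services.drop i) := by
  induction n with
  | zero =>
      intro i hi
      rw [chunksFrom]
      have hle : services.length ≤ i := by omega
      rw [if_neg (by omega), List.drop_eq_nil_of_le hle]
      simp [altChunks]
  | succ n ih =>
      intro i hi
      by_cases h : i < services.length
      · rw [chunksFrom, if_pos h]
        rw [ih (i + 8) (by omega)]
        cases hd : services.drop i with
        | nil =>
            exfalso
            have := congrArg List.length hd
            simp only [List.length_drop, List.length_nil] at this
            omega
        | cons y ys =>
            have hsl : PySem.List.slice services (some (i : Int)) (some ((i : Int) + 8))
                = (services.drop i).take 8 := by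
              exact_mod_cast PySem.List.slice_natCast_add services i 8
            have hdd : services.drop (i + 8) = ys.drop 7 := by
              have h2 : (services.drop i).drop 8 = services.drop (i + 8) := by
                rw [List.drop_drop]
              rw [← h2, hd]
              rfl
            rw [hsl, hd, hdd]
            simp [altChunks]
      · rw [chunksFrom, if_neg h, List.drop_eq_nil_of_le (by omega)]
        simp [altChunks]

lemma chunksFrom_eq (services : List Int) :
    chunksFrom services 0 = altChunks services := by
  have := chunksFrom_eq_fuel services services.length 0 (by omega)
  simpa using this


-- chars-level image of A's loop step
def stepC (out : List Char) (p : Int × Int) : List Char :=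
  out ++ ((if p.1 != 0 then [',', ' '] else []) ++ (if PySem.Int.mod p.1 8 == 0 then ['\n'] else [])) ++ PySem.Int.toChars p.2

-- chars of the inner part of a chunk (each element preceded by ", ")
def catInner (c : List Int) : List Char :=
  (c.map (fun x => [',', ' '] ++ PySem.Int.toChars x)).flatten

-- chars of a tail list of chunks (each preceded by ", \n")
def catChunksS (ls : List String) : List Char :=
  (ls.map (fun s => [',', ' ', '\n'] ++ s.toList)).flatten

lemma toList_foldA (e : List (Int × Int)) (acc : String) :
    ((e.foldl
        (fun out p =>
          let append := if p.1 != 0 then ", " else ""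
          let append := if PySem.Int.mod p.1 8 == 0 then append ++ "\n" else append
          out ++ append ++ PySem.Int.toStr p.2)
        acc).toList)
    = e.foldl stepC acc.toList := by
  induction e generalizing acc with
  | nil => simp
  | cons p e ih =>
      simp only [List.foldl_cons]
      rw [ih]
      congr 1
      simp only [stepC]
      by_cases h1 : (p.1 != 0) = true <;> by_cases h2 : (PySem.Int.mod p.1 8 == 0) = true <;>
        [ have h2' : (8 : Int) ∣ p.1 := (PySem.Int.mod_eq_zero_iff_dvd p.1 8).mp (by simpa using h2);
          have h2' : ¬ (8 : Int) ∣ p.1 := fun hd => h2 (by rw [(PySem.Int.mod_eq_zero_iff_dvd p.1 8).mpr hd]; rfl);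
          have h2' : (8 : Int) ∣ p.1 := (PySem.Int.mod_eq_zero_iff_dvd p.1 8).mp (by simpa using h2);
          have h2' : ¬ (8 : Int) ∣ p.1 := fun hd => h2 (by rw [(PySem.Int.mod_eq_zero_iff_dvd p.1 8).mpr hd]; rfl)] <;>
        simp [h1, h2', String.toList_append, PySem.Int.toList_toStr]

lemma joinC (c : List Int) : ∀ (y : Int),
    PySem.Chars.join [',', ' '] (PySem.Int.toChars y :: c.map PySem.Int.toChars)
      = PySem.Int.toChars y ++ catInner c := by
  induction c with
  | nil => intro y; simp [PySem.Chars.join_singleton, catInner]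
  | cons z c ih =>
      intro y
      simp only [List.map_cons]
      rw [PySem.Chars.join_cons_cons]
      rw [show (PySem.Int.toChars z :: c.map PySem.Int.toChars)
            = PySem.Int.toChars z :: c.map PySem.Int.toChars from rfl]
      rw [ih z]
      simp [catInner, List.append_assoc]

lemma joinConsChars (y : Int) (c : List Int) :
    (PySem.Str.join ", " ((y :: c).map PySem.Int.toStr)).toList
      = PySem.Int.toChars y ++ catInner c := by
  rw [PySem.Str.toList_join]
  have h : List.map String.toList (List.map PySem.Int.toStr (y :: c))
      = PySem.Int.toChars y :: c.map PySem.Int.toChars := by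
    simp [List.map_map, Function.comp, PySem.Int.toList_toStr]
  rw [h]
  exact joinC c y

lemma joinChunksChars (ls : List String) : ∀ (c : String),
    (PySem.Str.join ", \n" (c :: ls)).toList = c.toList ++ catChunksS ls := by
  induction ls with
  | nil => intro c; rw [PySem.Str.toList_join]; simp [PySem.Chars.join_singleton, catChunksS]
  | cons d ls ih =>
      intro c
      rw [PySem.Str.toList_join]
      simp only [List.map_cons]
      rw [PySem.Chars.join_cons_cons]
      have hd := ih d
      rw [PySem.Str.toList_join] at hd
      simp only [List.map_cons] at hd
      rw [hd]
      simp [catChunksS, List.append_assoc]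

lemma catChunksS_cons (s : String) (ls : List String) :
    catChunksS (s :: ls) = [',', ' ', '\n'] ++ s.toList ++ catChunksS ls := by
  simp [catChunksS]

lemma innerLemma (c : List Int) : ∀ (i0 : Int) (acc : List Char), 0 < i0 → i0 % 8 ≠ 0 → i0 % 8 + c.length ≤ 8 →
    (PySem.List.enumerate c i0).foldl stepC acc = acc ++ catInner c := by
  induction c with
  | nil => intro i0 acc _ _ _; simp [PySem.List.enumerate_nil, catInner]
  | cons x cs ih =>
      intro i0 acc h0 h8 hlen
      rw [PySem.List.enumerate_cons, List.foldl_cons]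
      have hne : (i0 != 0) = true := by simp; omega
      have hd : ¬ (8 : Int) ∣ i0 := by omega
      have hstep : stepC acc (i0, x) = acc ++ ([',', ' '] ++ PySem.Int.toChars x) := by
        simp [stepC, hne, hd]
      rw [hstep]
      cases cs with
      | nil => simp [PySem.List.enumerate_nil, catInner]
      | cons z zs =>
          have hmod : i0 % 8 ≤ 6 := by
            simp only [List.length_cons] at hlen; omega
          rw [ih (i0 + 1) _ (by omega) (by omega) (by simp only [List.length_cons] at hlen ⊢; omega)]
          simp [catInner, List.append_assoc]

lemma masterLemma (n : Nat) : ∀ (xs : List Int), xs.length ≤ n → ∀ (i0 : Int) (acc : List Char), 0 < i0 → i0 % 8 = 1 →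
    (PySem.List.enumerate xs i0).foldl stepC acc
      = acc ++ catInner (xs.take 7) ++ catChunksS (altChunks (xs.drop 7)) := by
  induction n with
  | zero =>
      intro xs hlen i0 acc h0 h8
      have : xs = [] := by cases xs <;> simp_all
      subst this
      simp [PySem.List.enumerate_nil, catInner, altChunks, catChunksS]
  | succ n ih =>
      intro xs hlen i0 acc h0 h8
      cases xs with
      | nil => simp [PySem.List.enumerate_nil, catInner, altChunks, catChunksS]
      | cons x xs' =>
          have hxr : x :: xs' = (x :: xs').take 7 ++ (x :: xs').drop 7 := (List.take_append_drop 7 _).symm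
          have hc7 : ((x :: xs').take 7).length ≤ 7 := by simp
          conv_lhs => rw [hxr]
          rw [PySem.List.enumerate_append, List.foldl_append]
          rw [innerLemma _ i0 acc h0 (by omega) (by omega)]
          cases hr : (x :: xs').drop 7 with
          | nil => simp [altChunks, catChunksS]
          | cons y r' =>
              have hlx : (x :: xs').length = 7 + (y :: r').length := by
                have := congrArg List.length hr
                simp only [List.length_drop] at this
                simp only [List.length_cons] at this ⊢
                omega
              have hc7' : ((x :: xs').take 7).length = 7 := by
                simp only [List.length_take]
                omega
              rw [PySem.List.enumerate_cons, List.foldl_cons]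
              have hi1 : i0 + (((x :: xs').take 7).length : Int) = i0 + 7 := by
                rw [hc7']; norm_num
              rw [hi1]
              have hne : (i0 + 7 != 0) = true := by simp; omega
              have hd : (8 : Int) ∣ i0 + 7 := by omega
              have hstep : ∀ a, stepC a (i0 + 7, y) = a ++ ([',', ' ', '\n'] ++ PySem.Int.toChars y) := by
                intro a; simp [stepC, hne, hd]
              rw [hstep]
              rw [ih r' (by simp only [List.length_cons] at hlen hlx; omega) (i0 + 7 + 1) _ (by omega) (by omega)]
              have haltc : altChunks (y :: r') = PySem.Str.join ", " (((y :: r').take 8).map PySem.Int.toStr) :: altChunks (r'.drop 7) := by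
                simp [altChunks]
              have htk : (y :: r').take 8 = y :: r'.take 7 := by simp
              rw [htk] at haltc
              rw [haltc, catChunksS_cons, joinConsChars]
              simp [List.append_assoc]

lemma mainChars (l : List Int) :
    ((PySem.List.enumerate l).foldl stepC [])
      = if l = [] then [] else '\n' :: (PySem.Str.join ", \n" (altChunks l)).toList := by
  cases l with
  | nil => simp [PySem.List.enumerate_nil]
  | cons x xs =>
      simp only [if_neg (by simp : ¬ (x :: xs = []))]
      rw [PySem.List.enumerate_cons, List.foldl_cons]
      have hstep : stepC [] ((0 : Int), x) = ['\n'] ++ PySem.Int.toChars x := by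
        simp [stepC, PySem.Int.mod]
      rw [hstep]
      have h01 : (0 : Int) + 1 = 1 := by norm_num
      rw [h01]
      rw [masterLemma xs.length xs le_rfl 1 _ (by norm_num) (by norm_num)]
      have haltc : altChunks (x :: xs) = PySem.Str.join ", " (((x :: xs).take 8).map PySem.Int.toStr) :: altChunks (xs.drop 7) := by
        simp [altChunks]
      have htk : (x :: xs).take 8 = x :: xs.take 7 := by simp
      rw [htk] at haltc
      rw [haltc, joinChunksChars, joinConsChars]
      simp [List.append_assoc]

lemma strip_newline (cs : List Char) : PySem.Chars.strip ('\n' :: cs) = PySem.Chars.strip cs := by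
  simp [PySem.Chars.strip, PySem.Chars.lstrip,
    (by decide : PySem.Chars.isspace '\n' = true)]

-- ===== VERDICT (by name: the statement is the Claim_ definition above) =====
theorem services_to_string_spec : Claim_equal_services_to_string := by
  intro services truncate _
  unfold Spec_services_to_string services_to_string services_to_string_alt
  cases truncate with
  | false => rfl
  | true =>
      simp only [Bool.not_true, if_neg (by decide : ¬ (false = true))]
      rw [← String.toList_inj]
      rw [PySem.Str.toList_strip, PySem.Str.toList_strip]
      rw [toList_foldA]
      have h0 : ("".toList : List Char) = [] := rfl
      rw [h0]
      rw [chunksFrom_eq]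
      rw [mainChars]
      cases l : services with
      | nil => simp [altChunks, PySem.Str.join, PySem.Chars.join, List.intercalate]
      | cons x xs =>
          simp only [if_neg (by simp : ¬ (x :: xs = []))]
          exact strip_newline _
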